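-- pv_equiv track=rewrite | github.com/sana-doganus/stepanova_labs | lab3.py | rarest_word
-- ===== SOURCE A (Python) =====
-- from collections import Counter
--
-- def rarest_word(string):  # задача 3 - самое редкое слово
--     if not string or string.isdigit():
--         return 'Слов нет'
--     # чистка строки от цифр и знаков препинания, перевод в нижний регистр
--     new_string = ''
--     for i in string:
--         if i.isalpha() or i.isspace():
--             new_string = new_string + i.lower()
--
--     # разбивка получившейся строки на слова
--     split_string = new_string.split()
--
--     # создание словаря с ключами-словами и значениями-колвом появлений в строке
--     word_freqs = Counter(split_string)
--
--     if not word_freqs:  # прекращение функцию при пустом словаре чтобы прога не ломалась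
--         return 'Слов нет'
--
--     # генератор списка из слов с наименьшим появлением
--     words = [i for i in word_freqs if word_freqs.get(i) == min(word_freqs.values())]
--
--     # возврат первого значения в списке, отсортированном по алфавиту
--     return sorted(words)[0]
-- ===== SOURCE B (Python) =====
-- def rarest_word(string):
--     # clean: keep letters and whitespace, lowercased; non-words fall out naturally,
--     # so the empty/all-digit guards of the original are not needed
--     cleaned = ''.join(c.lower() for c in string if c.isalpha() or c.isspace())
--     counts = {}
--     for w in cleaned.split():
--         counts[w] = counts.get(w, 0) + 1
--     # one scan over the alphabetically sorted unique words, keeping the word with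
--     # the strictly smallest count seen so far (strict < keeps the first minimum)
--     best = None
--     for w in sorted(counts):
--         if best is None or counts[w] < counts[best]:
--             best = w
--     return best if best is not None else 'Слов нет'
-- ===== Notes on version B (the rewrite author's own statement) =====
-- stated objective: simpler
-- what changed: B drops the empty/all-digit guards and the min-of-values/filter-winners/sort-winners pipeline: it cleans by filter+map, counts with a plain dict loop, and picks the answer in one strict-< scan over the alphabetically sorted unique words (so the first minimum wins), falling back to 'Слов нет' only when no word was seen.
import Mathlib
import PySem

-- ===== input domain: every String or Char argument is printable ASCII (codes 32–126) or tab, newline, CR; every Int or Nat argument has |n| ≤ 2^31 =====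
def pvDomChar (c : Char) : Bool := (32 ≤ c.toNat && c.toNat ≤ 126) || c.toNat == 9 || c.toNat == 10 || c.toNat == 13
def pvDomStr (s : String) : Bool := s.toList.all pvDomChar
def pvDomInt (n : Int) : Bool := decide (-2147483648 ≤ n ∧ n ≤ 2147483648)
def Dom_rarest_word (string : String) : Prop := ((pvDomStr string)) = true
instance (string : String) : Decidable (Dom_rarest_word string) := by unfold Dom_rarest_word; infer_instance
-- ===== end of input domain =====

-- B replaces A's guards + min(values)/filter/sort-winners pipeline by one strict-< scan
-- over the alphabetically sorted unique words (objective: simpler).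

-- ===== PORT A =====
def rarest_word (string : String) : String :=
  if string = "" ∨ PySem.Str.strIsdigit string = true then "Слов нет"
  else
    let new_string : List Char := string.toList.foldl
      (fun acc i => if PySem.Chars.isalpha i || PySem.Chars.isspace i
                    then acc ++ [PySem.Chars.lowerChar i] else acc) []
    let split_string := PySem.Str.split₀ (String.ofList new_string)
    let word_freqs := PySem.Dict.counter split_string
    if word_freqs.size = 0 then "Слов нет"
    else
      let words := word_freqs.keys.filter
        (fun i => word_freqs.get? i == PySem.List.min? word_freqs.values (fun x => x))
      -- sorted(words)[0]: words is provably nonempty here, so the [0] never raises; headD's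
      -- default is unreachable
      (PySem.List.sorted words (fun x => x) false).headD ""

-- ===== PORT B =====
-- the counting loop of Source B ('counts[w] = counts.get(w, 0) + 1')
def pvCount (l : List String) : PySem.Dict String Int :=
  l.foldl (fun d w => d.insert w (d.getD w 0 + 1)) PySem.Dict.empty

-- the selection loop of Source B (strict-< running minimum, 'best' starts as None)
def pvScan (counts : PySem.Dict String Int) (l : List String) : Option String :=
  l.foldl
    (fun best w =>
      match best with
      | none => some w
      | some b => if counts.getD w 0 < counts.getD b 0 then some w else some b) none

-- Source B's final 'best if best is not None else …'
def pvPick (best : Option String) : String :=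
  match best with
  | some b => b
  | none => "Слов нет"

def rarest_word_alt (string : String) : String :=
  let cleaned : List Char :=
    (string.toList.filter (fun c => PySem.Chars.isalpha c || PySem.Chars.isspace c)).map
      PySem.Chars.lowerChar
  let counts := pvCount (PySem.Str.split₀ (String.ofList cleaned))
  let best := pvScan counts (PySem.List.sorted counts.keys (fun x => x) false)
  pvPick best

-- ===== PRECONDITION & SPEC =====
def Spec_rarest_word (string : String) (out : String) : Prop := out = rarest_word_alt string
instance (string : String) (out : String) : Decidable (Spec_rarest_word string out) := by
  unfold Spec_rarest_word; infer_instance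

-- ===== CLAIM (what is proved, stated in full; the proofs are below) =====
def Claim_equal_rarest_word : Prop :=
  ∀ (string : String), Dom_rarest_word string → Spec_rarest_word string (rarest_word string)

-- ===== LEMMAS AND PROOFS =====

-- the word list both ports count
def pvWords (string : String) : List String :=
  PySem.Str.split₀ (String.ofList
    ((string.toList.filter (fun c => PySem.Chars.isalpha c || PySem.Chars.isspace c)).map
      PySem.Chars.lowerChar))

-- the running-minimum loop of B, in direct recursion
def pvGo (g : String → Int) (b : String) : List String → String
  | [] => b
  | w :: t => pvGo g (if g w < g b then w else b) t

lemma pvMin?_eq_go (g : String → Int) :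
    ∀ (t : List String) (b : String),
      PySem.List.min? (b :: t) g = some (pvGo g b t) := by
  intro t
  induction t with
  | nil => intro b; rfl
  | cons w t ih =>
    intro b
    unfold PySem.List.min? at ih ⊢
    simp only [List.foldl_cons, pvGo] at ih ⊢
    by_cases h : g w < g b
    · simp only [if_pos h]
      exact ih w
    · simp only [if_neg h]
      exact ih b

lemma pvGo_min (g : String → Int) :
    ∀ (t : List String) (b : String),
      g (pvGo g b t) ≤ g b ∧ ∀ y ∈ t, g (pvGo g b t) ≤ g y := by
  intro t
  induction t with
  | nil => intro b; simp [pvGo]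
  | cons w t ih =>
    intro b
    simp only [pvGo]
    obtain ⟨h1, h2⟩ := ih (if g w < g b then w else b)
    by_cases hwb : g w < g b
    · simp only [if_pos hwb] at h1 h2 ⊢
      refine ⟨le_trans h1 (le_of_lt hwb), ?_⟩
      intro y hy
      rcases List.mem_cons.mp hy with rfl | hy
      · exact h1
      · exact h2 y hy
    · simp only [if_neg hwb] at h1 h2 ⊢
      refine ⟨h1, ?_⟩
      intro y hy
      rcases List.mem_cons.mp hy with rfl | hy
      · exact le_trans h1 (not_lt.mp hwb)
      · exact h2 y hy

lemma pvGo_head (g : String → Int) :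
    ∀ (t : List String) (b : String),
      ((b :: t).filter (fun x => decide (g x = g (pvGo g b t)))).head? = some (pvGo g b t) := by
  intro t
  induction t with
  | nil => intro b; simp [pvGo]
  | cons w t ih =>
    intro b
    by_cases hwb : g w < g b
    · have hgo : pvGo g b (w :: t) = pvGo g w t := by simp [pvGo, if_pos hwb]
      rw [hgo]
      have hrw : g (pvGo g w t) ≤ g w := (pvGo_min g t w).1
      have hbr : ¬ (g b = g (pvGo g w t)) := by
        intro h
        exact absurd (lt_of_le_of_lt hrw (h ▸ hwb)) (lt_irrefl _)
      rw [List.filter_cons, if_neg (by simp only [decide_eq_true_eq]; exact hbr)]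
      exact ih w
    · have hgo : pvGo g b (w :: t) = pvGo g b t := by simp [pvGo, if_neg hwb]
      rw [hgo]
      have hrb : g (pvGo g b t) ≤ g b := (pvGo_min g t b).1
      have ihb := ih b
      by_cases hbr : g b = g (pvGo g b t)
      · rw [List.filter_cons, if_pos (decide_eq_true hbr)] at ihb
        simp only [List.head?_cons, Option.some.injEq] at ihb
        rw [List.filter_cons, if_pos (decide_eq_true hbr)]
        simp only [List.head?_cons]
        exact congrArg some ihb
      · have hwr : ¬ g w = g (pvGo g b t) := by
          intro h
          exact hbr (le_antisymm (h ▸ not_lt.mp hwb) hrb)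
        rw [List.filter_cons, if_neg (by simp only [decide_eq_true_eq]; exact hbr)] at ihb
        rw [List.filter_cons, if_neg (by simp only [decide_eq_true_eq]; exact hbr),
            List.filter_cons, if_neg (by simp only [decide_eq_true_eq]; exact hwr)]
        exact ihb

lemma pvMin?_head (g : String → Int) (l : List String) (m : String)
    (h : PySem.List.min? l g = some m) :
    (l.filter (fun x => decide (g x = g m))).head? = some m := by
  cases l with
  | nil => simp [PySem.List.min?] at h
  | cons x t =>
    rw [pvMin?_eq_go] at h
    obtain rfl : m = pvGo g x t := (Option.some.injEq _ _).mp h.symm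
    exact pvGo_head g t x

lemma pvDigit (c : Char) (h : PySem.Chars.isdigit c = true) :
    (PySem.Chars.isalpha c || PySem.Chars.isspace c) = false := by
  simp only [PySem.Chars.isdigit, PySem.Chars.isalpha, PySem.Chars.isupper, PySem.Chars.islower,
    PySem.Chars.isspace, Bool.and_eq_true, decide_eq_true_eq, Char.le_def, Bool.or_eq_false_iff,
    Bool.and_eq_false_iff, decide_eq_false_iff_not, Char.toNat, not_le,
    UInt32.le_iff_toNat_le,
    show '0'.val.toNat = 48 from rfl, show '9'.val.toNat = 57 from rfl,
    show 'A'.val.toNat = 65 from rfl, show 'Z'.val.toNat = 90 from rfl,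
    show 'a'.val.toNat = 97 from rfl, show 'z'.val.toNat = 122 from rfl] at h ⊢
  omega

lemma pvCount_eq (l : List String) : pvCount l = PySem.Dict.counter l :=
  PySem.Dict.foldl_insert_getD_add_one_eq_counter l

lemma pvScan_eq (d : PySem.Dict String Int) (l : List String) :
    pvScan d l = PySem.List.min? l (fun w => d.getD w 0) := by
  unfold pvScan PySem.List.min?
  congr 1
  funext acc x
  cases acc <;> rfl

lemma pvAlt_eq (s : String) :
    rarest_word_alt s =
      pvPick (PySem.List.min?
        (PySem.List.sorted (PySem.Dict.counter (pvWords s)).keys (fun x => x) false)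
        (fun w => (PySem.Dict.counter (pvWords s)).getD w 0)) := by
  simp only [rarest_word_alt, pvWords, pvCount_eq]
  rw [pvScan_eq]

lemma pvWords_nil_alt (s : String) (h : pvWords s = []) : rarest_word_alt s = "Слов нет" := by
  rw [pvAlt_eq, h]
  rfl

lemma pvWords_digit (s : String) (h : PySem.Str.strIsdigit s = true) : pvWords s = [] := by
  have hall : ∀ c ∈ s.toList, PySem.Chars.isdigit c = true := by
    simp only [PySem.Str.strIsdigit, PySem.Chars.strIsdigit, Bool.and_eq_true,
      List.all_eq_true] at h
    exact h.2
  have hfil : s.toList.filter (fun c => PySem.Chars.isalpha c || PySem.Chars.isspace c) = [] := by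
    rw [List.filter_eq_nil_iff]
    intro c hc
    simp [pvDigit c (hall c hc)]
  unfold pvWords
  rw [hfil]
  rfl

lemma pvA_eq (s : String) (hg : ¬(s = "" ∨ PySem.Str.strIsdigit s = true)) :
    rarest_word s =
      (if (PySem.Dict.counter (pvWords s)).size = 0 then "Слов нет"
       else
         (PySem.List.sorted
           ((PySem.Dict.counter (pvWords s)).keys.filter
             (fun i => (PySem.Dict.counter (pvWords s)).get? i ==
               PySem.List.min? (PySem.Dict.counter (pvWords s)).values (fun x => x)))
           (fun x => x) false).headD "") := by
  unfold rarest_word pvWords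
  rw [if_neg hg, PySem.List.foldl_append_if]
  simp only [List.nil_append]

-- ===== VERDICT (by name: the statement is the Claim_ definition above) =====
theorem rarest_word_spec : Claim_equal_rarest_word := by
  intro s _hdom
  unfold Spec_rarest_word
  by_cases hg : s = "" ∨ PySem.Str.strIsdigit s = true
  · have hA : rarest_word s = "Слов нет" := by unfold rarest_word; rw [if_pos hg]
    have hws : pvWords s = [] := by
      rcases hg with rfl | hdig
      · rfl
      · exact pvWords_digit s hdig
    rw [hA, pvWords_nil_alt s hws]
  · rw [pvA_eq s hg, pvAlt_eq s]
    by_cases hsz : (PySem.Dict.counter (pvWords s)).size = 0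
    · rw [if_pos hsz]
      have hitems : (PySem.Dict.counter (pvWords s)).items = [] :=
        List.length_eq_zero_iff.mp hsz
      have hkeys : (PySem.Dict.counter (pvWords s)).keys = [] := by
        simp [PySem.Dict.keys, hitems]
      rw [hkeys]
      rfl
    · rw [if_neg hsz]
      set ws := pvWords s with hwsdef
      set d := PySem.Dict.counter ws with hddef
      have hnd : d.keys.Nodup := PySem.Dict.nodup_keys_counter ws
      have hkne : d.keys ≠ [] := by
        intro h
        apply hsz
        have : d.items = [] := by
          have hlen := congrArg List.length h
          simpa [PySem.Dict.keys] using hlen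
        simp [PySem.Dict.size, this]
      set ks := PySem.List.sorted d.keys (fun x => x) false with hksdef
      have hperm : ks.Perm d.keys := PySem.List.sorted_perm d.keys _ false
      have hkne' : ks ≠ [] := by
        intro h
        exact hkne ((PySem.List.sorted_eq_nil_iff d.keys _ false).mp (hksdef ▸ h))
      cases hmin : PySem.List.min? ks (fun w => d.getD w 0) with
      | none => exact absurd ((PySem.List.min?_eq_none_iff ks _).mp hmin) hkne'
      | some m =>
        have hvals : d.values = d.keys.map (fun k => d.getD k 0) :=
          PySem.Dict.values_eq_map_keys d hnd 0
        have hvne : d.values ≠ [] := by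
          rw [hvals]
          simpa using hkne
        cases hM : PySem.List.min? d.values (fun x => x) with
        | none => exact absurd ((PySem.List.min?_eq_none_iff d.values _).mp hM) hvne
        | some M =>
          have hmks : m ∈ ks := PySem.List.min?_mem hmin
          have hmkeys : m ∈ d.keys := hperm.mem_iff.mp hmks
          have hMg : M = d.getD m 0 := by
            refine le_antisymm ?_ ?_
            · exact PySem.List.min?_isMin hM _ (by rw [hvals]; exact List.mem_map_of_mem hmkeys)
            · obtain ⟨k0, hk0mem, hk0⟩ := by
                have := PySem.List.min?_mem hM
                rw [hvals] at this
                exact List.mem_map.mp this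
              rw [← hk0]
              exact PySem.List.min?_isMin hmin k0 (hperm.mem_iff.mpr hk0mem)
          have hfilter :
              d.keys.filter (fun i => d.get? i == some M) =
              d.keys.filter (fun x => decide (d.getD x 0 = d.getD m 0)) := by
            apply List.filter_congr
            intro i hi
            have hget : d.get? i = some (d.getD i 0) := by
              apply PySem.Dict.get?_of_mem_items _ _ hnd
              rw [PySem.Dict.items_eq_map_keys d hnd 0]
              exact List.mem_map_of_mem hi
            rw [hget, ← hMg]
            apply Bool.eq_iff_iff.mpr
            simp [beq_iff_eq]
          have hpair : ks.Pairwise (· < ·) := by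
            rw [hksdef, hddef, PySem.Dict.keys_counter]
            exact PySem.List.sorted_ofList_pairwise_lt ws
          have hsorted2 :
              PySem.List.sorted
                (d.keys.filter (fun x => decide (d.getD x 0 = d.getD m 0))) (fun x => x) false =
              ks.filter (fun x => decide (d.getD x 0 = d.getD m 0)) :=
            PySem.List.sorted_eq_of_perm_of_pairwise_lt _ _ _
              (hperm.filter _) (hpair.filter _)
          have hhead : (ks.filter (fun x => decide (d.getD x 0 = d.getD m 0))).head? = some m :=
            pvMin?_head (fun w => d.getD w 0) ks m hmin
          rw [hfilter, hsorted2]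
          cases hcl : ks.filter (fun x => decide (d.getD x 0 = d.getD m 0)) with
          | nil => rw [hcl] at hhead; simp at hhead
          | cons a t =>
            rw [hcl] at hhead
            simp only [List.head?_cons, Option.some.injEq] at hhead
            simp [hhead, pvPick]
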